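-- pv_equiv track=rewrite | github.com/freedom6xiaobai/translation_desktop | sentence_former.py | merge_unique_sentences
-- ===== SOURCE A (Python) =====
-- def merge_unique_sentences(sentences):
--     result = []
--     for i, s in enumerate(sentences):
--         is_contained = False
--         for j, t in enumerate(sentences):
--             if i != j and s in t:
--                 is_contained = True
--                 break
--         if not is_contained and s not in result:
--             result.append(s)
--     return result
-- ===== SOURCE B (Python) =====
-- def merge_unique_sentences(sentences):
--     # Staged algorithm: count occurrences, then build the set of "maximal"
--     # sentences by scanning distinct sentences from longest to shortest,
--     # keeping those not contained in an already-kept maximal sentence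
--     # (containment is transitive, so checking against maximal ones suffices);
--     # a sentence survives iff it occurs exactly once and is maximal.
--     counts = {}
--     for s in sentences:
--         counts[s] = counts.get(s, 0) + 1
--     maximal = []
--     for s in sorted(counts, key=len, reverse=True):
--         if not any(s in m for m in maximal):
--             maximal.append(s)
--     keep = set(maximal)
--     return [s for s in sentences if counts[s] == 1 and s in keep]
-- ===== Notes on version B (the rewrite author's own statement) =====
-- stated objective: faster
-- what changed: Replaces A's all-pairs indexed substring scan plus dedup-list membership by a staged algorithm: one counting pass, then a longest-first scan over the distinct sentences that keeps only maximal representatives (containment is transitive, so substring tests run against the shrinking representative set instead of all sentences), then a single filter pass.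
import Mathlib
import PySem

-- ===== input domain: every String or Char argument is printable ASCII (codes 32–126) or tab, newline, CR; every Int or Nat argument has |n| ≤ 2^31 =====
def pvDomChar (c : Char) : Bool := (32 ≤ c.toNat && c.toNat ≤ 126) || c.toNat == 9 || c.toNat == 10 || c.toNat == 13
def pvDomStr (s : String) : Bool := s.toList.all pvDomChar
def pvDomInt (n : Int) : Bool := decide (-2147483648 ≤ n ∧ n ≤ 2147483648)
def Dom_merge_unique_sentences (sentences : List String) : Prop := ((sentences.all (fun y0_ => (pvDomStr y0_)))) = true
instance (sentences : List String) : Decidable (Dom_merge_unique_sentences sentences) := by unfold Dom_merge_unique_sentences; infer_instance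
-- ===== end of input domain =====

-- B replaces A's all-pairs substring scan by a staged algorithm: a counting pass, then a
-- longest-first scan over the distinct sentences that keeps "maximal" representatives
-- (containment is transitive, so checking against representatives suffices), then one filter pass.

-- ===== PORT A =====
def merge_unique_sentences (sentences : List String) : List String :=
  (PySem.List.enumerate sentences).foldl
    (fun result p =>
      let is_contained :=
        (PySem.List.enumerate sentences).foldl
          (fun ic q => if (p.1 != q.1) && PySem.Str.isIn p.2 q.2 then true else ic)
          false
      if !is_contained && !(result.contains p.2) then result ++ [p.2] else result)
    []

-- ===== PORT B =====
-- the body of B's 'for s in sorted(counts, key=len, reverse=True)' loop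
def pvMaxStep (maximal : List String) (s : String) : List String :=
  if !(maximal.any (fun m => PySem.Str.isIn s m)) then maximal ++ [s] else maximal

def merge_unique_sentences_alt (sentences : List String) : List String :=
  let counts : PySem.Dict String Int :=
    sentences.foldl (fun d s => d.insert s (d.getD s 0 + 1)) PySem.Dict.empty
  let maximal : List String :=
    (PySem.List.sorted counts.keys (fun s => PySem.Str.len s) true).foldl pvMaxStep []
  let keep : PySem.Set String := PySem.Set.ofList maximal
  sentences.filter (fun s => counts.getD s 0 == 1 && PySem.Set.contains keep s)

-- ===== PRECONDITION & SPEC =====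
def Spec_merge_unique_sentences (sentences : List String) (out : List String) : Prop := out = merge_unique_sentences_alt sentences
instance (sentences : List String) (out : List String) : Decidable (Spec_merge_unique_sentences sentences out) := by unfold Spec_merge_unique_sentences; infer_instance

-- ===== CLAIM (what is proved, stated in full; the proofs are below) =====
def Claim_equal_merge_unique_sentences : Prop := ∀ (sentences : List String), Dom_merge_unique_sentences sentences → Spec_merge_unique_sentences sentences (merge_unique_sentences sentences)

-- ===== LEMMAS AND PROOFS =====

-- the common keep-test both programs compute: occurs exactly once, and no strictly longer sentence contains it
def pvKeep (sentences : List String) (s : String) : Bool :=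
  ((sentences.count s : Int) == 1) &&
    !(sentences.any (fun t =>
        decide (PySem.Str.len s < PySem.Str.len t) && PySem.Str.isIn s t))

lemma isIn_self (s : String) : PySem.Str.isIn s s = true := by
  rw [PySem.Str.isIn_iff_infix]

lemma eq_of_isIn_of_not_lt (s t : String) (h : PySem.Str.isIn s t = true)
    (hl : ¬ PySem.Str.len s < PySem.Str.len t) : s = t := by
  rw [PySem.Str.isIn_iff_infix] at h
  have hle : s.toList.length ≤ t.toList.length := h.sublist.length_le
  have hs' : s.length = s.toList.length := rfl
  have ht' : t.length = t.toList.length := rfl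
  have hlen : s.toList.length = t.toList.length := by
    simp [PySem.Str.len_eq] at hl
    omega
  have := h.sublist.eq_of_length hlen
  exact String.ext (by simpa [String.toList] using this)

-- ----- A-side: A = filter pvKeep -----

lemma count_two_of_lt_idx {s : String} (l : List String) (i k : Nat)
    (hi : i < l.length) (hk : k < l.length) (hlt : i < k)
    (h1 : l[i] = s) (h2 : l[k] = s) : 2 ≤ l.count s := by
  have hmt : s ∈ l.take k := by
    refine List.mem_iff_getElem.mpr ⟨i, ?_, ?_⟩
    · simp [List.length_take]; omega
    · simp [h1]
  have hmd : s ∈ l.drop k := by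
    refine List.mem_iff_getElem.mpr ⟨0, ?_, ?_⟩
    · simp [List.length_drop]; omega
    · simp [h2]
  have happ := List.take_append_drop k l
  calc 2 ≤ (l.take k).count s + (l.drop k).count s := by
            have c1 := List.count_pos_iff.mpr hmt
            have c2 := List.count_pos_iff.mpr hmd
            omega
    _ = l.count s := by rw [← List.count_append, happ]

lemma two_le_count_of_two_idx {s : String} (l : List String) (i k : Nat)
    (hi : i < l.length) (hk : k < l.length) (hik : i ≠ k)
    (h1 : l[i] = s) (h2 : l[k] = s) : 2 ≤ l.count s := by
  rcases Nat.lt_or_ge i k with h | h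
  · exact count_two_of_lt_idx l i k hi hk h h1 h2
  · exact count_two_of_lt_idx l k i hk hi (by omega) h2 h1

lemma exists_other_idx_of_count_ne_one {s : String} (l : List String) (i : Nat)
    (hi : i < l.length) (hs : l[i] = s) (hc : l.count s ≠ 1) :
    ∃ k, ∃ (hk : k < l.length), k ≠ i ∧ l[k] = s := by
  have hmem : s ∈ l := hs ▸ List.getElem_mem hi
  have h1 : 1 ≤ l.count s := List.count_pos_iff.mpr hmem
  have h2 : 2 ≤ l.count s := by omega
  have hsplit : l = l.take i ++ l[i] :: l.drop (i + 1) := by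
    conv_lhs => rw [← List.take_append_drop i l]
    rw [List.drop_eq_getElem_cons hi]
  have hcnt : l.count s = (l.take i).count s + 1 + (l.drop (i + 1)).count s := by
    conv_lhs => rw [hsplit, hs]
    simp only [List.count_append, List.count_cons_self]
    omega
  rcases Nat.lt_or_ge 0 ((l.take i).count s) with hpos | hz
  · have hmem' : s ∈ l.take i := List.count_pos_iff.mp hpos
    rcases List.mem_iff_getElem.mp hmem' with ⟨j, hj, hjv⟩
    have hj' : j < i ∧ j < l.length := by
      rw [List.length_take, Nat.lt_min] at hj
      exact hj
    refine ⟨j, hj'.2, by omega, ?_⟩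
    simpa using hjv
  · have hdpos : 0 < (l.drop (i + 1)).count s := by omega
    have hmem' : s ∈ l.drop (i + 1) := List.count_pos_iff.mp hdpos
    rcases List.mem_iff_getElem.mp hmem' with ⟨j, hj, hjv⟩
    have hjl : i + 1 + j < l.length := by
      rw [List.length_drop] at hj
      omega
    refine ⟨i + 1 + j, hjl, by omega, ?_⟩
    rw [List.getElem_drop] at hjv
    exact hjv

lemma inner_contained (sentences : List String) (i : Nat) (hi : i < sentences.length) :
    ((PySem.List.enumerate sentences).foldl
        (fun ic q => if (((i : Int)) != q.1) && PySem.Str.isIn sentences[i] q.2 then true else ic)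
        false)
      = !(pvKeep sentences sentences[i]) := by
  rw [PySem.List.foldl_if_true_eq, Bool.false_or]
  generalize hs : sentences[i] = s
  by_cases hlt : sentences.any (fun t =>
      decide (PySem.Str.len s < PySem.Str.len t) && PySem.Str.isIn s t) = true
  · -- some strictly longer sentence contains s: both sides true
    have hR : pvKeep sentences s = false := by
      simp only [pvKeep]
      rw [hlt]
      simp
    rcases List.any_eq_true.mp hlt with ⟨t, ht, hcond⟩
    simp only [Bool.and_eq_true, decide_eq_true_eq] at hcond
    rcases List.mem_iff_getElem.mp ht with ⟨j, hj, hjv⟩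
    have hne : s ≠ t := by
      intro h
      rw [h] at hcond
      exact lt_irrefl _ hcond.1
    have hL : (PySem.List.enumerate sentences).any
        (fun q => (((i : Int)) != q.1) && PySem.Str.isIn s q.2) = true := by
      rw [List.any_eq_true]
      refine ⟨((0 : Int) + (j : Int), sentences[j]),
        (PySem.List.mem_enumerate_iff _ _ _).mpr ⟨j, hj, rfl⟩, ?_⟩
      simp only [Bool.and_eq_true, bne_iff_ne, ne_eq, zero_add]
      constructor
      · intro h
        have hij : i = j := by exact_mod_cast h
        subst hij
        exact hne (hs.symm.trans hjv)
      · rw [hjv]; exact hcond.2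
    rw [hL, hR]; rfl
  · by_cases hc : sentences.count s = 1
    · -- kept by both: the any-loop finds nothing
      have hlt' : sentences.any (fun t =>
          decide (PySem.Str.len s < PySem.Str.len t) && PySem.Str.isIn s t) = false := by
        simpa using hlt
      have hR : pvKeep sentences s = true := by
        simp only [pvKeep]
        rw [hlt']
        simp [hc]
      have hL : (PySem.List.enumerate sentences).any
          (fun q => (((i : Int)) != q.1) && PySem.Str.isIn s q.2) = false := by
        rw [List.any_eq_false]
        intro q hq
        rcases (PySem.List.mem_enumerate_iff _ _ _).mp hq with ⟨k, hk, rfl⟩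
        simp only [Bool.and_eq_true, bne_iff_ne, ne_eq, not_and, zero_add]
        intro hik hin
        have hnl := List.any_eq_false.mp hlt' sentences[k] (List.getElem_mem hk)
        simp only [Bool.and_eq_true, decide_eq_true_eq, not_and] at hnl
        have heq : s = sentences[k] := by
          apply eq_of_isIn_of_not_lt _ _ hin
          intro hlen
          exact hnl hlen hin
        have hik' : i ≠ k := by
          intro h
          exact hik (by exact_mod_cast congrArg (Nat.cast : Nat → Int) h)
        have : 2 ≤ sentences.count s :=
          two_le_count_of_two_idx sentences i k hi hk hik' hs heq.symm
        omega
      rw [hL, hR]; rfl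
    · -- count ≠ 1 (duplicate): both sides true
      have hR : pvKeep sentences s = false := by
        have hbeq : ((sentences.count s : Int) == 1) = false := by
          simp only [beq_eq_false_iff_ne, ne_eq]
          exact_mod_cast fun h => hc (by exact_mod_cast h)
        simp [pvKeep, hbeq]
      rcases exists_other_idx_of_count_ne_one sentences i hi hs hc with ⟨k, hk, hki, hkv⟩
      have hL : (PySem.List.enumerate sentences).any
          (fun q => (((i : Int)) != q.1) && PySem.Str.isIn s q.2) = true := by
        rw [List.any_eq_true]
        refine ⟨((0 : Int) + (k : Int), sentences[k]),
          (PySem.List.mem_enumerate_iff _ _ _).mpr ⟨k, hk, rfl⟩, ?_⟩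
        simp only [Bool.and_eq_true, bne_iff_ne, ne_eq, zero_add]
        constructor
        · intro h
          exact hki (by exact_mod_cast h.symm)
        · rw [hkv]; exact isIn_self s
      rw [hL, hR]; rfl

lemma fold_filter (K : String → Bool) (l acc : List String)
    (h : ∀ s, K s = true → acc.count s + l.count s ≤ 1) :
    l.foldl (fun res s => if K s && !(res.contains s) then res ++ [s] else res) acc
      = acc ++ l.filter K := by
  induction l generalizing acc with
  | nil => simp
  | cons x xs ih =>
    rw [List.foldl_cons]
    by_cases hK : K x = true
    · have hx := h x hK
      rw [List.count_cons_self] at hx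
      have hacc0 : acc.count x = 0 := by omega
      have hmem0 : x ∉ acc := by rw [← List.count_eq_zero]; exact hacc0
      rw [if_pos (by simp [hK, hmem0])]
      have ih' := ih (acc ++ [x]) (by
        intro s hsK
        have hh := h s hsK
        simp only [List.count_append, List.count_cons, List.count_nil] at hh ⊢
        split_ifs at hh ⊢ <;> omega)
      rw [ih']
      simp [hK]
    · rw [if_neg (by simp [hK])]
      have hKx : K x = false := by simpa using hK
      have ih' := ih acc (by
        intro s hsK
        have hh := h s hsK
        simp only [List.count_cons] at hh
        split_ifs at hh <;> omega)
      rw [ih']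
      simp [hKx]

lemma enum_fold_to_fold (sentences : List String) (K : String → Bool) :
    (PySem.List.enumerate sentences).foldl
        (fun res p => if K p.2 && !(res.contains p.2) then res ++ [p.2] else res) []
      = sentences.foldl
        (fun res s => if K s && !(res.contains s) then res ++ [s] else res) [] := by
  conv_rhs => rw [← PySem.List.map_snd_enumerate sentences 0]
  rw [List.foldl_map]

lemma a_eq_filter (sentences : List String) :
    merge_unique_sentences sentences = sentences.filter (pvKeep sentences) := by
  have hcong : merge_unique_sentences sentences
      = (PySem.List.enumerate sentences).foldl
          (fun res p => if pvKeep sentences p.2 && !(res.contains p.2) then res ++ [p.2] else res)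
          [] := by
    unfold merge_unique_sentences
    apply PySem.List.foldl_congr_mem
    intro acc p hp
    rcases (PySem.List.mem_enumerate_iff _ _ _).mp hp with ⟨k, hk, rfl⟩
    simp only [zero_add]
    rw [inner_contained sentences k hk]
    simp
  rw [hcong, enum_fold_to_fold sentences (pvKeep sentences)]
  have hcounts : ∀ s, pvKeep sentences s = true →
      (List.nil : List String).count s + sentences.count s ≤ 1 := by
    intro s hsK
    simp only [pvKeep, Bool.and_eq_true, beq_iff_eq] at hsK
    have h1 : (sentences.count s : Int) = 1 := hsK.1
    have : sentences.count s = 1 := by exact_mod_cast h1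
    simp [this]
  rw [fold_filter (pvKeep sentences) sentences [] hcounts]
  simp

-- ----- B-side: the maximal-representatives fold -----

lemma pvMaxStep_pos (acc : List String) (s : String)
    (h : acc.any (fun m => PySem.Str.isIn s m) = true) : pvMaxStep acc s = acc := by
  unfold pvMaxStep
  rw [h]
  rfl

lemma pvMaxStep_neg (acc : List String) (s : String)
    (h : acc.any (fun m => PySem.Str.isIn s m) = false) : pvMaxStep acc s = acc ++ [s] := by
  unfold pvMaxStep
  rw [h]
  rfl

lemma mem_maxStep_of_mem {acc : List String} {x s : String} (h : x ∈ acc) :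
    x ∈ pvMaxStep acc s := by
  unfold pvMaxStep
  split <;> simp [h]

lemma mem_foldl_maxStep_of_mem (L : List String) (acc : List String) (x : String)
    (h : x ∈ acc) : x ∈ L.foldl pvMaxStep acc := by
  induction L generalizing acc with
  | nil => simpa using h
  | cons a t ih => exact ih _ (mem_maxStep_of_mem h)

lemma mem_of_mem_foldl_maxStep (L : List String) (acc : List String) (x : String)
    (h : x ∈ L.foldl pvMaxStep acc) : x ∈ acc ∨ x ∈ L := by
  induction L generalizing acc with
  | nil => exact Or.inl (by simpa using h)
  | cons a t ih =>
    rcases ih _ h with h' | h'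
    · unfold pvMaxStep at h'
      split at h'
      · rcases List.mem_append.mp h' with h'' | h''
        · exact Or.inl h''
        · exact Or.inr (by simp at h''; simp [h''])
      · exact Or.inl h'
    · exact Or.inr (List.mem_cons_of_mem _ h')

lemma cover_foldl_maxStep (L : List String) (acc : List String) :
    ∀ s ∈ L, ∃ m ∈ L.foldl pvMaxStep acc, PySem.Str.isIn s m = true := by
  induction L generalizing acc with
  | nil => simp
  | cons a t ih =>
    intro s hs
    rcases List.mem_cons.mp hs with rfl | hs'
    · by_cases hAny : acc.any (fun m => PySem.Str.isIn s m) = true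
      · rcases List.any_eq_true.mp hAny with ⟨m, hm, hin⟩
        exact ⟨m, mem_foldl_maxStep_of_mem t _ m (mem_maxStep_of_mem hm), hin⟩
      · have hstep : pvMaxStep acc s = acc ++ [s] :=
          pvMaxStep_neg acc s (Bool.eq_false_iff.mpr hAny)
        refine ⟨s, ?_, isIn_self s⟩
        rw [List.foldl_cons, hstep]
        exact mem_foldl_maxStep_of_mem t _ s (by simp)
    · exact ih _ s hs'

lemma mem_maximal_iff (L : List String) (hnd : L.Nodup)
    (hpw : L.Pairwise (fun a b => PySem.Str.len b ≤ PySem.Str.len a))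
    (s : String) (hs : s ∈ L) :
    s ∈ L.foldl pvMaxStep [] ↔
      ¬ ∃ t ∈ L, PySem.Str.len s < PySem.Str.len t ∧ PySem.Str.isIn s t = true := by
  obtain ⟨P, Q, rfl⟩ := List.append_of_mem hs
  have hnd' := hnd
  rw [List.nodup_append] at hnd'
  have hsP : s ∉ P := fun h => hnd'.2.2 s h s (by simp) rfl
  have hsQ : s ∉ Q := by
    have := hnd'.2.1
    rw [List.nodup_cons] at this
    exact this.1
  rw [List.pairwise_append] at hpw
  have hPlong : ∀ m ∈ P, PySem.Str.len s ≤ PySem.Str.len m :=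
    fun m hm => hpw.2.2 m hm s (by simp)
  have hQshort : ∀ t ∈ Q, PySem.Str.len t ≤ PySem.Str.len s := by
    have := hpw.2.1
    rw [List.pairwise_cons] at this
    exact this.1
  have hfold : (P ++ s :: Q).foldl pvMaxStep [] =
      Q.foldl pvMaxStep (pvMaxStep (P.foldl pvMaxStep []) s) := by
    rw [List.foldl_append]
    rfl
  have haccP_sub : ∀ x ∈ P.foldl pvMaxStep [], x ∈ P := fun x hx =>
    (mem_of_mem_foldl_maxStep P [] x hx).resolve_left (by simp)
  constructor
  · rintro hmem ⟨t, ht, hlt, hin⟩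
    have htP : t ∈ P := by
      rcases List.mem_append.mp ht with h | h
      · exact h
      · rcases List.mem_cons.mp h with rfl | h'
        · exact absurd hlt (lt_irrefl _)
        · exact absurd hlt (not_lt.mpr (hQshort t h'))
    obtain ⟨m, hmacc, hinm⟩ := cover_foldl_maxStep P [] t htP
    have hinsm : PySem.Str.isIn s m = true := by
      rw [PySem.Str.isIn_iff_infix] at hin hinm ⊢
      exact hin.trans hinm
    have hstep : pvMaxStep (P.foldl pvMaxStep []) s = P.foldl pvMaxStep [] :=
      pvMaxStep_pos _ s (List.any_eq_true.mpr ⟨m, hmacc, hinsm⟩)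
    rw [hfold, hstep] at hmem
    rcases mem_of_mem_foldl_maxStep _ _ _ hmem with h | h
    · exact hsP (haccP_sub s h)
    · exact hsQ h
  · intro hno
    have hany : (P.foldl pvMaxStep []).any (fun m => PySem.Str.isIn s m) = false := by
      rw [List.any_eq_false]
      intro m hm hin
      have hmP := haccP_sub m hm
      by_cases hl : PySem.Str.len s < PySem.Str.len m
      · exact hno ⟨m, List.mem_append_left _ hmP, hl, hin⟩
      · exact hsP ((eq_of_isIn_of_not_lt s m hin hl) ▸ hmP)
    have hstep : pvMaxStep (P.foldl pvMaxStep []) s = P.foldl pvMaxStep [] ++ [s] :=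
      pvMaxStep_neg _ s hany
    rw [hfold, hstep]
    exact mem_foldl_maxStep_of_mem _ _ _ (by simp)

lemma alt_eq_filter (sentences : List String) :
    merge_unique_sentences_alt sentences = sentences.filter (pvKeep sentences) := by
  have hkeys : (sentences.foldl (fun d s => d.insert s (d.getD s 0 + 1))
      (PySem.Dict.empty : PySem.Dict String Int)).keys = PySem.Set.ofList sentences := by
    rw [PySem.Dict.keys_foldl_insert]
    simp [PySem.Set.update_nil_left]
  show sentences.filter _ = _
  apply List.filter_congr
  intro s hsmem
  rw [hkeys]
  have hcnt : (sentences.foldl (fun d s => d.insert s (d.getD s 0 + 1))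
      (PySem.Dict.empty : PySem.Dict String Int)).getD s 0 = (sentences.count s : Int) := by
    rw [PySem.Dict.getD_foldl_insert_add_one]
    simp
  rw [hcnt]
  set L := PySem.List.sorted (PySem.Set.ofList sentences) (fun s => PySem.Str.len s) true with hL
  have hperm : L.Perm (PySem.Set.ofList sentences) := PySem.List.sorted_perm _ _ _
  have hnd : L.Nodup := hperm.nodup_iff.mpr (PySem.Set.nodup_ofList sentences)
  have hmemL : ∀ x, x ∈ L ↔ x ∈ sentences := by
    intro x
    rw [hperm.mem_iff, PySem.Set.mem_ofList]
  have hpw : L.Pairwise (fun a b => PySem.Str.len b ≤ PySem.Str.len a) :=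
    PySem.List.sorted_pairwise_rev _ _
  have hiff := mem_maximal_iff L hnd hpw s ((hmemL s).mpr hsmem)
  have hiff' : s ∈ L.foldl pvMaxStep [] ↔
      (sentences.any (fun t =>
        decide (PySem.Str.len s < PySem.Str.len t) && PySem.Str.isIn s t)) = false := by
    rw [hiff]
    constructor
    · intro hno
      rw [List.any_eq_false]
      intro t ht
      simp only [Bool.and_eq_true, decide_eq_true_eq, not_and]
      intro hlt hin
      exact hno ⟨t, (hmemL t).mpr ht, hlt, hin⟩
    · intro hfalse
      rintro ⟨t, ht, hlt, hin⟩
      have := List.any_eq_false.mp hfalse t ((hmemL t).mp ht)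
      simp only [Bool.and_eq_true, decide_eq_true_eq, not_and] at this
      exact this hlt hin
  unfold pvKeep
  congr 1
  by_cases hmemM : s ∈ L.foldl pvMaxStep []
  · have hc : PySem.Set.contains (PySem.Set.ofList (L.foldl pvMaxStep [])) s = true := by
      rw [PySem.Set.contains_iff, PySem.Set.mem_ofList]
      exact hmemM
    rw [hc, hiff'.mp hmemM]
    rfl
  · have hc : PySem.Set.contains (PySem.Set.ofList (L.foldl pvMaxStep [])) s = false := by
      rw [Bool.eq_false_iff]
      intro h
      rw [PySem.Set.contains_iff, PySem.Set.mem_ofList] at h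
      exact hmemM h
    rw [hc]
    rcases Bool.eq_false_or_eq_true (sentences.any (fun t =>
        decide (PySem.Str.len s < PySem.Str.len t) && PySem.Str.isIn s t)) with h | h
    · rw [h]
      rfl
    · exact absurd (hiff'.mpr h) hmemM

-- ===== VERDICT (by name: the statement is the Claim_ definition above) =====
theorem merge_unique_sentences_spec : Claim_equal_merge_unique_sentences := by
  intro sentences _
  show merge_unique_sentences sentences = merge_unique_sentences_alt sentences
  rw [a_eq_filter, alt_eq_filter]
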